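-- pv_equiv track=rewrite | github.com/damianjozwiak/wzk | lab2/bbs.py | runsTest
-- ===== SOURCE A (Python) =====
-- def intervalCheck(runs):
--     if not (2315 <= runs[0] <= 2685):
--         return False
--     if not (1114 <= runs[1] <= 1386):
--         return False
--     if not (527 <= runs[2] <= 723):
--         return False
--     if not (240 <= runs[3] <= 384):
--         return False
--     if not (103 <= runs[4] <= 209):
--         return False
--     if not (103 <= runs[5] <= 209):
--         return False
--     return True
--
-- def runsTest(sequence):
--     ref = sequence[0]
--     length = 0
--     zeroRuns = [0, 0, 0, 0, 0, 0]
--     oneRuns = [0, 0, 0, 0, 0, 0]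
--     seq = ''
--     for x in sequence:
--         if x == ref:
--             length += 1
--             seq += x
--         else:
--             if length < 6:
--                 if ref == '1':
--                     oneRuns[length - 1] += 1
--                 elif ref == '0':
--                     zeroRuns[length - 1] += 1
--             else:
--                 if ref == '1':
--                     oneRuns[5] += 1
--                 elif ref == '0':
--                     zeroRuns[5] += 1
--             ref = x
--             length = 1
--
--     return intervalCheck(oneRuns) and intervalCheck(zeroRuns)
-- ===== SOURCE B (Python) =====
-- def _runs(sequence):
--     # run-length encode the whole sequence as (char, length) pairs
--     runs = []
--     i, n = 0, len(sequence)
--     while i < n: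
--         j = i + 1
--         while j < n and sequence[j] == sequence[i]:
--             j += 1
--         runs.append((sequence[i], j - i))
--         i = j
--     return runs
--
-- _BOUNDS = [(2315, 2685), (1114, 1386), (527, 723), (240, 384), (103, 209), (103, 209)]
--
-- def _check(runs):
--     return all(lo <= r <= hi for r, (lo, hi) in zip(runs, _BOUNDS))
--
-- def runsTest(sequence):
--     oneRuns = [0] * 6
--     zeroRuns = [0] * 6
--     for ch, ln in _runs(sequence)[:-1]:  # the final run is never counted (as in A)
--         if ch == '1':
--             oneRuns[min(ln, 6) - 1] += 1
--         elif ch == '0':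
--             zeroRuns[min(ln, 6) - 1] += 1
--     return _check(oneRuns) and _check(zeroRuns)
-- ===== Notes on version B (the rewrite author's own statement) =====
-- stated objective: alternative
-- what changed: B first materializes the run-length encoding of the string with a two-pointer scan, then buckets all runs but the last by min(length,6) in one pass over the pairs, and validates each count list against a bounds table with zip/all, replacing A's single-pass character state machine and its hard-coded if-chain interval check.
import Mathlib
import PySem

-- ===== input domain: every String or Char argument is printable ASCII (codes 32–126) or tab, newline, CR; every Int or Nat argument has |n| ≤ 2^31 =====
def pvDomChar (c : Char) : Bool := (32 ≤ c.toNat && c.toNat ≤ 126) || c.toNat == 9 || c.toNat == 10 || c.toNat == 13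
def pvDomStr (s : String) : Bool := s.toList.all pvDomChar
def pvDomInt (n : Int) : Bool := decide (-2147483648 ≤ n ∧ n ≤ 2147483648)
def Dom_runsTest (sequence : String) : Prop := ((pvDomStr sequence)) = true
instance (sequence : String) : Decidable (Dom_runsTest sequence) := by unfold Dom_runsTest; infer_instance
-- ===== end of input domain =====

-- B re-decomposes A's character state machine as: run-length encode, bucket all runs but the
-- last in one pass over (char,length) pairs, and table-check the counts; same O(n) cost.

-- ===== PORT A =====

-- lst[i] += 1 with Python index semantics (negative index counts from the end);
-- out-of-range (IndexError) is unreachable in A and leaves the list unchanged here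
def pyIncAt (l : List Int) (i : Int) : List Int :=
  let j : Int := if i < 0 then i + l.length else i
  if 0 ≤ j ∧ j < l.length then l.set j.toNat (l.getD j.toNat 0 + 1) else l

-- runs[0] … runs[5]: every caller passes a 6-element list, so getD 0 is exact (IndexError unreachable)
def intervalCheck (runs : List Int) : Bool :=
  if ¬ (2315 ≤ runs.getD 0 0 ∧ runs.getD 0 0 ≤ 2685) then false
  else if ¬ (1114 ≤ runs.getD 1 0 ∧ runs.getD 1 0 ≤ 1386) then false
  else if ¬ (527 ≤ runs.getD 2 0 ∧ runs.getD 2 0 ≤ 723) then false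
  else if ¬ (240 ≤ runs.getD 3 0 ∧ runs.getD 3 0 ≤ 384) then false
  else if ¬ (103 ≤ runs.getD 4 0 ∧ runs.getD 4 0 ≤ 209) then false
  else if ¬ (103 ≤ runs.getD 5 0 ∧ runs.getD 5 0 ≤ 209) then false
  else true

-- loop state of A: (ref, length, zeroRuns, oneRuns, seq)
structure StA where
  ref : Char
  len : Int
  zeroRuns : List Int
  oneRuns : List Int
  seq : List Char
deriving Repr

def stepA (st : StA) (x : Char) : StA :=
  if x == st.ref then
    { st with len := st.len + 1, seq := st.seq ++ [x] }
  else if st.len < 6 then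
    if st.ref == '1' then
      { ref := x, len := 1, zeroRuns := st.zeroRuns, oneRuns := pyIncAt st.oneRuns (st.len - 1), seq := st.seq }
    else if st.ref == '0' then
      { ref := x, len := 1, zeroRuns := pyIncAt st.zeroRuns (st.len - 1), oneRuns := st.oneRuns, seq := st.seq }
    else
      { ref := x, len := 1, zeroRuns := st.zeroRuns, oneRuns := st.oneRuns, seq := st.seq }
  else
    if st.ref == '1' then
      { ref := x, len := 1, zeroRuns := st.zeroRuns, oneRuns := pyIncAt st.oneRuns 5, seq := st.seq }
    else if st.ref == '0' then
      { ref := x, len := 1, zeroRuns := pyIncAt st.zeroRuns 5, oneRuns := st.oneRuns, seq := st.seq }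
    else
      { ref := x, len := 1, zeroRuns := st.zeroRuns, oneRuns := st.oneRuns, seq := st.seq }

def runsTest (sequence : String) : Bool :=
  match sequence.toList with
  | [] => false   -- sequence[0] raises IndexError on the empty string; excluded by Pre_runsTest
  | c :: _ =>
    let st := sequence.toList.foldl stepA ⟨c, 0, [0,0,0,0,0,0], [0,0,0,0,0,0], []⟩
    intervalCheck st.oneRuns && intervalCheck st.zeroRuns

-- ===== PORT B =====

-- _runs: run-length encoding by a two-pointer scan; the inner while loop counting the
-- chars equal to sequence[i] is takeWhile on the suffix, advancing i to j is dropWhile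
def bruns : List Char → List (Char × Int)
  | [] => []
  | c :: cs =>
    (c, 1 + ((cs.takeWhile (· == c)).length : Int)) :: bruns (cs.dropWhile (· == c))
termination_by l => l.length
decreasing_by
  exact Nat.lt_succ_of_le (List.length_dropWhile_le _ _)

def bBounds : List (Int × Int) := [(2315,2685),(1114,1386),(527,723),(240,384),(103,209),(103,209)]

def bcheck (runs : List Int) : Bool :=
  (runs.zip bBounds).all (fun p => decide (p.2.1 ≤ p.1) && decide (p.1 ≤ p.2.2))

-- loop body over a (char, length) pair; acc = (zeroRuns, oneRuns)
def bstep (acc : List Int × List Int) (p : Char × Int) : List Int × List Int :=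
  if p.1 == '1' then (acc.1, pyIncAt acc.2 (min p.2 6 - 1))
  else if p.1 == '0' then (pyIncAt acc.1 (min p.2 6 - 1), acc.2)
  else acc

def runsTest_alt (sequence : String) : Bool :=
  -- _runs(sequence)[:-1] is PySem.List.slice … none (some (-1))
  let acc := (PySem.List.slice (bruns sequence.toList) none (some (-1))).foldl bstep
               ([0,0,0,0,0,0], [0,0,0,0,0,0])
  bcheck acc.2 && bcheck acc.1

-- ===== PRECONDITION & SPEC =====
-- A reads sequence[0] and raises IndexError on the empty string; Pre_ excludes exactly that input.
def Pre_runsTest (sequence : String) : Prop := sequence ≠ ""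
instance (sequence : String) : Decidable (Pre_runsTest sequence) := by unfold Pre_runsTest; infer_instance
def pvWitness_runsTest : String := "0110100"

def Spec_runsTest (sequence : String) (out : Bool) : Prop := out = runsTest_alt sequence
instance (sequence : String) (out : Bool) : Decidable (Spec_runsTest sequence out) := by unfold Spec_runsTest; infer_instance

-- ===== CLAIM (what is proved, stated in full; the proofs are below) =====
def Claim_equal_runsTest : Prop := ∀ (sequence : String), Dom_runsTest sequence → Pre_runsTest sequence → Spec_runsTest sequence (runsTest sequence)

-- ===== LEMMAS AND PROOFS =====

-- A's recording body, as a function over (char, length) pairs (proof helper)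
def astep (acc : List Int × List Int) (p : Char × Int) : List Int × List Int :=
  if p.2 < 6 then
    if p.1 == '1' then (acc.1, pyIncAt acc.2 (p.2 - 1))
    else if p.1 == '0' then (pyIncAt acc.1 (p.2 - 1), acc.2)
    else acc
  else
    if p.1 == '1' then (acc.1, pyIncAt acc.2 5)
    else if p.1 == '0' then (pyIncAt acc.1 5, acc.2)
    else acc

-- A's run accumulator: the runs A will record from state (ref, len) on the rest of the input,
-- including the final (never-recorded) run
def gRun (ref : Char) (len : Int) : List Char → List (Char × Int)
  | [] => [(ref, len)]
  | x :: xs => if x == ref then gRun ref (len + 1) xs else (ref, len) :: gRun x 1 xs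

lemma bruns_nil : bruns [] = [] := by simp [bruns]

lemma bruns_cons (c : Char) (cs : List Char) :
    bruns (c :: cs) = (c, 1 + ((cs.takeWhile (· == c)).length : Int)) :: bruns (cs.dropWhile (· == c)) := by
  rw [bruns.eq_def]

lemma astep_eq_bstep (acc : List Int × List Int) (p : Char × Int) : astep acc p = bstep acc p := by
  by_cases h6 : p.2 < 6 <;> by_cases h1 : p.1 == '1' <;> by_cases h0 : p.1 == '0' <;>
    simp [astep, bstep, h6, h1, h0] <;> congr 1 <;> omega

lemma gRun_eq_bruns (l : List Char) : ∀ (ref : Char) (n : Int),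
    gRun ref n l = (ref, n + ((l.takeWhile (· == ref)).length : Int)) :: bruns (l.dropWhile (· == ref)) := by
  induction l with
  | nil => intro ref n; simp [gRun, bruns_nil]
  | cons x xs ih =>
    intro ref n
    by_cases h : x == ref
    · rw [gRun, if_pos h, ih, List.takeWhile_cons, List.dropWhile_cons]
      simp [h]
      omega
    · rw [gRun, if_neg h, List.takeWhile_cons, List.dropWhile_cons]
      simp only [h, Bool.false_eq_true, if_false]
      rw [ih x 1, bruns_cons]
      simp

lemma gRun_one (c : Char) (cs : List Char) : gRun c 1 cs = bruns (c :: cs) := by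
  rw [gRun_eq_bruns, bruns_cons]

lemma gRun_ne_nil (ref : Char) (len : Int) (l : List Char) : gRun ref len l ≠ [] := by
  rw [gRun_eq_bruns]; simp

lemma foldl_stepA (l : List Char) : ∀ (ref : Char) (len : Int) (zr or : List Int) (sq : List Char),
    ((l.foldl stepA ⟨ref, len, zr, or, sq⟩).zeroRuns, (l.foldl stepA ⟨ref, len, zr, or, sq⟩).oneRuns)
      = ((gRun ref len l).dropLast).foldl astep (zr, or) := by
  induction l with
  | nil => intro ref len zr or sq; simp [gRun]
  | cons x xs ih =>
    intro ref len zr or sq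
    by_cases h : x == ref
    · simp only [List.foldl_cons, stepA, h, if_pos]
      rw [ih]
      rw [gRun, if_pos h]
    · have hdl : ((gRun ref len (x :: xs)).dropLast) = (ref, len) :: (gRun x 1 xs).dropLast := by
        rw [gRun, if_neg h]
        exact List.dropLast_cons_of_ne_nil (gRun_ne_nil _ _ _)
      rw [hdl, List.foldl_cons]
      by_cases h6 : len < 6 <;> by_cases h1 : ref == '1' <;> by_cases h0 : ref == '0' <;>
        simp only [List.foldl_cons, stepA, astep, h, h6, h1, h0, Bool.false_eq_true, if_true,
          if_false] <;> rw [ih]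

lemma pyIncAt_length (l : List Int) (i : Int) : (pyIncAt l i).length = l.length := by
  unfold pyIncAt
  dsimp only
  split <;> split <;> simp

lemma bstep_length (acc : List Int × List Int) (p : Char × Int) :
    (bstep acc p).1.length = acc.1.length ∧ (bstep acc p).2.length = acc.2.length := by
  unfold bstep
  split_ifs <;> simp [pyIncAt_length]

lemma foldl_bstep_length (ps : List (Char × Int)) : ∀ (acc : List Int × List Int),
    (ps.foldl bstep acc).1.length = acc.1.length ∧ (ps.foldl bstep acc).2.length = acc.2.length := by
  induction ps with
  | nil => intro acc; exact ⟨rfl, rfl⟩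
  | cons p ps ih =>
    intro acc
    rw [List.foldl_cons]
    obtain ⟨h1, h2⟩ := ih (bstep acc p)
    obtain ⟨g1, g2⟩ := bstep_length acc p
    exact ⟨h1.trans g1, h2.trans g2⟩

lemma intervalCheck_eq_bcheck (l : List Int) (h : l.length = 6) : intervalCheck l = bcheck l := by
  match l, h with
  | [a, b, c, d, e, f], _ =>
    simp only [intervalCheck, bcheck, bBounds, List.zip, List.zipWith, List.all_cons, List.all_nil,
      List.getD, List.getElem?_cons_zero, List.getElem?_cons_succ, Option.getD_some]
    by_cases h1 : 2315 ≤ a ∧ a ≤ 2685 <;> by_cases h2 : 1114 ≤ b ∧ b ≤ 1386 <;>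
      by_cases h3 : 527 ≤ c ∧ c ≤ 723 <;> by_cases h4 : 240 ≤ d ∧ d ≤ 384 <;>
      by_cases h5 : 103 ≤ e ∧ e ≤ 209 <;> by_cases h6 : 103 ≤ f ∧ f ≤ 209 <;>
      simp_all

-- ===== VERDICT (by name: the statement is the Claim_ definition above) =====
theorem runsTest_spec : Claim_equal_runsTest := by
  intro s _ hpre
  unfold Spec_runsTest runsTest runsTest_alt
  have hnil : s.toList ≠ [] := fun h => hpre (String.toList_eq_nil_iff.mp h)
  cases hl : s.toList with
  | nil => exact absurd hl hnil
  | cons c cs =>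
    simp only
    have hfold := foldl_stepA (c :: cs) c 0 [0,0,0,0,0,0] [0,0,0,0,0,0] []
    have hg : gRun c 0 (c :: cs) = bruns (c :: cs) := by
      rw [gRun, if_pos (by simp), show (0 : Int) + 1 = 1 from rfl, gRun_one]
    rw [hg] at hfold
    have hab : astep = bstep := funext fun a => funext fun p => astep_eq_bstep a p
    rw [hab] at hfold
    have hz := congrArg Prod.fst hfold
    have ho := congrArg Prod.snd hfold
    simp only at hz ho
    rw [PySem.List.slice_to_neg_one]
    have hlen := foldl_bstep_length ((bruns (c :: cs)).dropLast)
      (([0,0,0,0,0,0] : List Int), ([0,0,0,0,0,0] : List Int))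
    rw [hz, ho,
        intervalCheck_eq_bcheck _ (by rw [hlen.2]; rfl),
        intervalCheck_eq_bcheck _ (by rw [hlen.1]; rfl)]
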